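-- pv_equiv track=rewrite | github.com/mohammed1ali1said/Genetic-Alg-AI | strings.py | evaluation
-- ===== SOURCE A (Python) =====
-- def evaluation(genes):
--     word = "Hello, world!"
--     dict = {}
--     geneCount ={}
--     for i in range(len(word)):
--         if word[i] in dict:
--             dict[word[i]] += 1
--         else:
--             dict[word[i]] = 1
--
--     exact = 0
--     for i in range(len(word)):
--         if word[i] == genes[i]:
--             exact+=1
--
--     for i in range(len(genes)):
--         if genes[i] in geneCount:
--             geneCount[genes[i]]+=1
--         else:
--             geneCount[genes[i]] = 1
--     sum = 0
--     for i in geneCount: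
--         if i in dict:
--             sum += min(geneCount[i],dict[i])
--     sum -=exact
--     return sum
-- ===== SOURCE B (Python) =====
-- def evaluation(genes):
--     word = "Hello, world!"
--     exact = 0
--     for i in range(len(word)):
--         if word[i] == genes[i]:
--             exact += 1
--     a = sorted(word)
--     b = sorted(genes)
--     i = j = shared = 0
--     while i < len(a) and j < len(b):
--         if a[i] == b[j]:
--             shared += 1
--             i += 1
--             j += 1
--         elif a[i] < b[j]:
--             i += 1
--         else:
--             j += 1
--     return shared - exact
-- ===== Notes on version B (the rewrite author's own statement) =====
-- stated objective: alternative
-- what changed: The two frequency-dictionary builds and the keys/min loop are replaced by sorting both strings and counting the multiset intersection with a two-pointer merge; the indexed positional-match loop is kept.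
import Mathlib
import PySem

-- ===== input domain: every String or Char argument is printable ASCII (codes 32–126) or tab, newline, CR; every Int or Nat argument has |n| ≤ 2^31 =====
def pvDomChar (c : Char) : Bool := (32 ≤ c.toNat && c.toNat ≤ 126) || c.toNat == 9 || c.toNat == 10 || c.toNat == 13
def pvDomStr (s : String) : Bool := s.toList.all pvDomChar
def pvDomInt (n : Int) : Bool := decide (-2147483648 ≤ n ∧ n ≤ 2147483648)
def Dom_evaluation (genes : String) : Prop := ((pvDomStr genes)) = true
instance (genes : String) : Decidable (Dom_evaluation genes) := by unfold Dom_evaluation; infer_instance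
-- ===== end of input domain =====

-- B replaces A's two frequency-dictionary builds and the keys/min loop by sorting both strings
-- and counting the multiset intersection with a two-pointer merge (alternative algorithm).


-- ===== PORT A =====
def evaluation (genes : String) : Int :=
  let word : List Char := "Hello, world!".toList
  let gs : List Char := genes.toList
  -- dict: character counter of word, built by the indexed if-in loop
  let dict : PySem.Dict Char Int :=
    (PySem.List.pyRange 0 (PySem.List.len word)).foldl
      (fun d i =>
        let c := PySem.List.pyGetD word i ' '
        if d.contains c then d.insert c (d.getD c 0 + 1) else d.insert c 1)
      PySem.Dict.empty
  -- exact: positional matches (genes[i] raises for i ≥ len(genes); Pre_ excludes that)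
  let exact : Int :=
    (PySem.List.pyRange 0 (PySem.List.len word)).foldl
      (fun e i =>
        if PySem.List.pyGetD word i ' ' == PySem.List.pyGetD gs i ' ' then e + 1 else e) 0
  -- geneCount: character counter of genes
  let geneCount : PySem.Dict Char Int :=
    (PySem.List.pyRange 0 (PySem.List.len gs)).foldl
      (fun d i =>
        let c := PySem.List.pyGetD gs i ' '
        if d.contains c then d.insert c (d.getD c 0 + 1) else d.insert c 1)
      PySem.Dict.empty
  -- for i in geneCount: if i in dict: sum += min(geneCount[i], dict[i])
  let s : Int :=
    geneCount.keys.foldl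
      (fun s c => if dict.contains c then s + min (geneCount.getD c 0) (dict.getD c 0) else s) 0
  s - exact

-- ===== PORT B =====
-- the while loop over indices i, j into the two sorted lists, as structural recursion on the
-- two suffixes a[i:], b[j:] (exact: each branch advances the same pointer the Python advances)
def pvMerge : List Char → List Char → Int
  | x :: xs, y :: ys =>
      if x == y then 1 + pvMerge xs ys
      else if x < y then pvMerge xs (y :: ys)
      else pvMerge (x :: xs) ys
  | _, _ => 0
termination_by a b => a.length + b.length

def evaluation_alt (genes : String) : Int :=
  let word : List Char := "Hello, world!".toList
  let gs : List Char := genes.toList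
  let exact : Int :=
    (PySem.List.pyRange 0 (PySem.List.len word)).foldl
      (fun e i =>
        if PySem.List.pyGetD word i ' ' == PySem.List.pyGetD gs i ' ' then e + 1 else e) 0
  let a : List Char := PySem.List.sorted word (fun c => c) false
  let b : List Char := PySem.List.sorted gs (fun c => c) false
  let shared : Int := pvMerge a b
  shared - exact

-- ===== PRECONDITION & SPEC =====
-- Pre_ excludes exactly the genes shorter than the 13-character target, on which A (and B)
-- raises IndexError at genes[i].
def Pre_evaluation (genes : String) : Prop := 13 ≤ genes.toList.length
instance (genes : String) : Decidable (Pre_evaluation genes) := by unfold Pre_evaluation; infer_instance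
def pvWitness_evaluation : String := "abcdefghijklm"

def Spec_evaluation (genes : String) (out : Int) : Prop := out = evaluation_alt genes
instance (genes : String) (out : Int) : Decidable (Spec_evaluation genes out) := by unfold Spec_evaluation; infer_instance

-- ===== CLAIM (what is proved, stated in full; the proofs are below) =====
def Claim_equal_evaluation : Prop := ∀ (genes : String), Dom_evaluation genes → Pre_evaluation genes → Spec_evaluation genes (evaluation genes)

-- ===== LEMMAS AND PROOFS =====

-- an index loop 'for i in range(len(xs)): … xs[i] …' is a fold over xs
theorem fold_range_idx {α σ : Type} (xs : List α) (d : α) (F : σ → α → σ) (init : σ) :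
    (PySem.List.pyRange 0 (PySem.List.len xs)).foldl
      (fun s i => F s (PySem.List.pyGetD xs i d)) init = xs.foldl F init := by
  conv_rhs => rw [← PySem.List.map_pyGetD_pyRange_zero xs d]
  rw [List.foldl_map]

-- A's if-in counting step is the unconditional counter step
theorem counter_step_eq :
    (fun (d : PySem.Dict Char Int) (c : Char) =>
      if d.contains c then d.insert c (d.getD c 0 + 1) else d.insert c 1) =
    (fun (d : PySem.Dict Char Int) (c : Char) => d.insert c (d.getD c 0 + 1)) := by
  funext d c
  by_cases h : d.contains c = true
  · simp [h]
  · simp only [Bool.not_eq_true] at h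
    simp [h, PySem.Dict.getD_of_not_contains]

-- the whole indexed if-in counting loop builds Counter(xs)
theorem dict_loop_eq_counter (xs : List Char) :
    ((PySem.List.pyRange 0 (PySem.List.len xs)).foldl
      (fun d i =>
        let c := PySem.List.pyGetD xs i ' '
        if d.contains c then d.insert c (d.getD c 0 + 1) else d.insert c 1)
      PySem.Dict.empty) = PySem.Dict.counter xs := by
  refine (fold_range_idx xs ' '
      (fun (d : PySem.Dict Char Int) c => if d.contains c then d.insert c (d.getD c 0 + 1) else d.insert c 1)
      PySem.Dict.empty).trans ?_
  rw [counter_step_eq]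
  exact PySem.Dict.foldl_insert_getD_add_one_eq_counter xs

-- A's keys/min loop computes the cardinality of the multiset intersection
theorem a_sum_eq_card_inter (ws gs : List Char) :
    ((PySem.Set.ofList gs).foldl
      (fun s c => if ws.contains c then s + min ((gs.count c : Int)) ((ws.count c : Int)) else s) 0) =
    (((↑gs : Multiset Char) ∩ ↑ws).card : Int) := by
  have hstep : (fun (s : Int) (c : Char) =>
      if ws.contains c then s + min ((gs.count c : Int)) ((ws.count c : Int)) else s) =
      (fun s c => s + ((min (gs.count c) (ws.count c) : ℕ) : Int)) := by
    funext s c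
    by_cases h : c ∈ ws
    · simp [h, Nat.cast_min]
    · have : ws.count c = 0 := by rw [List.count_eq_zero]; exact h
      simp [h, this]
  rw [hstep, PySem.List.foldl_add]
  have hfin : (PySem.Set.ofList gs).toFinset = gs.toFinset := by
    apply Finset.ext
    intro c
    simp [List.mem_toFinset, PySem.Set.mem_ofList]
  have hsum : ((PySem.Set.ofList gs).map (fun c => ((min (gs.count c) (ws.count c) : ℕ) : Int))).sum
      = ((∑ c ∈ gs.toFinset, min (gs.count c) (ws.count c) : ℕ) : Int) := by
    rw [← List.sum_toFinset _ (PySem.Set.nodup_ofList gs), hfin]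
    push_cast
    rfl
  rw [hsum]
  have hmin : ∀ c, min (gs.count c) (ws.count c) = Multiset.count c ((↑gs : Multiset Char) ∩ ↑ws) := by
    intro c
    simp
  have hcard : (∑ c ∈ gs.toFinset, min (gs.count c) (ws.count c)) = ((↑gs : Multiset Char) ∩ ↑ws).card := by
    rw [Finset.sum_congr rfl (fun c _ => hmin c)]
    refine Multiset.sum_count_eq_card ?_
    intro a ha
    have hmem : a ∈ (↑gs : Multiset Char) := Multiset.mem_of_le Multiset.inter_le_left ha
    simpa [List.mem_toFinset] using hmem
  rw [hcard]
  simp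

-- the two-pointer merge over two ≤-sorted lists counts their multiset intersection
theorem pvMerge_eq_card_inter :
    ∀ (a b : List Char), a.Pairwise (· ≤ ·) → b.Pairwise (· ≤ ·) →
      pvMerge a b = (((↑a : Multiset Char) ∩ ↑b).card : Int) := by
  intro a b
  induction a, b using pvMerge.induct with
  | case1 x xs y ys heq ih =>
    intro ha hb
    have hx : x = y := by simpa using heq
    subst hx
    rw [pvMerge, if_pos (by simp)]
    rw [show ((↑(x :: xs) : Multiset Char) ∩ ↑(x :: ys)) = x ::ₘ ((↑xs : Multiset Char) ∩ ↑ys) by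
      simp]
    rw [Multiset.card_cons]
    push_cast
    rw [ih (List.Pairwise.of_cons ha) (List.Pairwise.of_cons hb)]
    ring
  | case2 x xs y ys heq hlt ih =>
    intro ha hb
    rw [pvMerge, if_neg (by simpa using heq), if_pos (by simpa using hlt)]
    have hxy : x < y := by simpa using hlt
    have hnot : x ∉ y :: ys := by
      intro hmem
      rcases List.mem_cons.mp hmem with h | h
      · exact absurd h (ne_of_lt hxy)
      · exact absurd ((List.pairwise_cons.mp hb).1 _ h) (not_le.mpr hxy)
    have hne : x ∉ (↑(y :: ys) : Multiset Char) := fun h => hnot (Multiset.mem_coe.mp h)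
    have hinter : ((↑(x :: xs) : Multiset Char) ∩ ↑(y :: ys)) = ((↑xs : Multiset Char) ∩ ↑(y :: ys)) := by
      rw [← Multiset.cons_coe]
      exact Multiset.cons_inter_of_neg _ hne
    rw [hinter]
    exact ih (List.Pairwise.of_cons ha) hb
  | case3 x xs y ys heq hlt ih =>
    intro ha hb
    rw [pvMerge, if_neg (by simpa using heq), if_neg (by simpa using hlt)]
    have hyx : y < x := by
      have h1 : ¬ x = y := by simpa using heq
      have h2 : ¬ x < y := by simpa using hlt
      exact lt_of_le_of_ne (not_lt.mp h2) (fun h => h1 h.symm)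
    have hnot : y ∉ x :: xs := by
      intro hmem
      rcases List.mem_cons.mp hmem with h | h
      · exact absurd h (ne_of_lt hyx)
      · exact absurd ((List.pairwise_cons.mp ha).1 _ h) (not_le.mpr hyx)
    have hne : y ∉ (↑(x :: xs) : Multiset Char) := fun h => hnot (Multiset.mem_coe.mp h)
    have hinter : ((↑(x :: xs) : Multiset Char) ∩ ↑(y :: ys)) = ((↑(x :: xs) : Multiset Char) ∩ ↑ys) := by
      rw [Multiset.inter_comm, ← Multiset.cons_coe, Multiset.cons_inter_of_neg _ hne,
        Multiset.inter_comm]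
    rw [hinter]
    exact ih ha (List.Pairwise.of_cons hb)
  | case4 a b h =>
    intro _ _
    cases a with
    | nil => simp [pvMerge]
    | cons x xs =>
      cases b with
      | nil => simp [pvMerge]
      | cons y ys => exact (h x xs y ys rfl rfl).elim

-- the A-side keys/min sum equals the B-side merge of the two sorted lists (symbolic form)
theorem a_sum_eq_merge_sorted (ws gs : List Char) :
    ((PySem.Set.ofList gs).foldl
      (fun s c => if ws.contains c then s + min ((gs.count c : Int)) ((ws.count c : Int)) else s) 0) =
    pvMerge (PySem.List.sorted ws (fun c => c) false) (PySem.List.sorted gs (fun c => c) false) := by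
  rw [a_sum_eq_card_inter,
    pvMerge_eq_card_inter _ _
      (by simpa using PySem.List.sorted_pairwise ws (fun c => c))
      (by simpa using PySem.List.sorted_pairwise gs (fun c => c))]
  have h1 : ((↑(PySem.List.sorted ws (fun c => c) false) : Multiset Char)) = (↑ws : Multiset Char) :=
    Multiset.coe_eq_coe.mpr (PySem.List.sorted_perm _ _ _)
  have h2 : ((↑(PySem.List.sorted gs (fun c => c) false) : Multiset Char)) = (↑gs : Multiset Char) :=
    Multiset.coe_eq_coe.mpr (PySem.List.sorted_perm _ _ _)
  rw [h1, h2]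
  exact congrArg (fun m => (Multiset.card m : Int)) (Multiset.inter_comm _ _)

-- ===== VERDICT (by name: the statement is the Claim_ definition above) =====
theorem evaluation_spec : Claim_equal_evaluation := by
  intro genes _ _
  unfold Spec_evaluation evaluation evaluation_alt
  simp only [dict_loop_eq_counter,
    PySem.Dict.keys_counter, PySem.Dict.contains_counter, PySem.Dict.getD_counter]
  rw [a_sum_eq_merge_sorted]
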